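-- pv_equiv track=rewrite | github.com/schumacherlab/ONT-TCRconsensus | ont_tcr_consensus/analysis.py | split_ref_names_set_into_subsets
-- ===== SOURCE A (Python) =====
-- def split_ref_names_set_into_subsets(ref_names_set: set):
--     non_n_ref_names_set = set()
--     full_n_ref_names_set = set()
--     cdr3j_n_ref_names_set = set()
--     v_n_ref_names_set = set()
--     for ref in ref_names_set:
--         if ref.endswith("full_n"):
--             full_n_ref_names_set.add(ref)
--         elif ref.endswith("cdr3j_n"):
--             cdr3j_n_ref_names_set.add(ref)
--         elif ref.endswith("v_n"):
--             v_n_ref_names_set.add(ref)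
--         else:
--             non_n_ref_names_set.add(ref)
--
--     return (
--         non_n_ref_names_set,
--         full_n_ref_names_set,
--         cdr3j_n_ref_names_set,
--         v_n_ref_names_set,
--     )
-- ===== SOURCE B (Python) =====
-- def split_ref_names_set_into_subsets(ref_names_set: set):
--     def peel(remaining, suffixes):
--         if not suffixes:
--             return [remaining]
--         matched = {r for r in remaining if r.endswith(suffixes[0])}
--         return [matched] + peel(remaining - matched, suffixes[1:])
--
--     full_b, cdr3j_b, v_b, non_b = peel(
--         set(ref_names_set), ["full_n", "cdr3j_n", "v_n"]
--     )
--     return (non_b, full_b, cdr3j_b, v_b)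
-- ===== Notes on version B (the rewrite author's own statement) =====
-- stated objective: alternative
-- what changed: Replaces A's single loop over elements with a 4-way if/elif dispatch into four accumulators by a recursion over the suffix list that at each step peels the matching elements off a shrinking remainder via set difference, the leftover remainder becoming the non-n bucket.
import Mathlib
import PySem

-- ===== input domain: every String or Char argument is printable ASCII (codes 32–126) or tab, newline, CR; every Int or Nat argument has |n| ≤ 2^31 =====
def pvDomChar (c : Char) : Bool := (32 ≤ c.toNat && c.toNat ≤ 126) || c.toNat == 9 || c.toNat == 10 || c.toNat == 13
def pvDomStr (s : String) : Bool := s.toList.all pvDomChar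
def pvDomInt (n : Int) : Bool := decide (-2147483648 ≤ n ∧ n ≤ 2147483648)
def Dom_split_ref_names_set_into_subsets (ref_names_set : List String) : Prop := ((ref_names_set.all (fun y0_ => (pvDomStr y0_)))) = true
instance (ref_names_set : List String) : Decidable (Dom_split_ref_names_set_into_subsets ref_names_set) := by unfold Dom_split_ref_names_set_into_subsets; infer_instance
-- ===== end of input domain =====

-- B replaces A's single loop with a 4-way if/elif dispatch by a recursion over the
-- suffix list that peels matched elements off a shrinking remainder via set difference
-- (alternative decomposition; same cost).


-- ===== PORT A =====
-- one pass over the set, dispatching each element into one of four accumulated sets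
def split_ref_names_set_into_subsets (ref_names_set : List String) : List String × List String × List String × List String :=
  ref_names_set.foldl
    (fun acc ref =>
      match acc with
      | (non_n, full_n, cdr3j_n, v_n) =>
        if PySem.Str.endswith ref "full_n" then
          (non_n, PySem.Set.add full_n ref, cdr3j_n, v_n)
        else if PySem.Str.endswith ref "cdr3j_n" then
          (non_n, full_n, PySem.Set.add cdr3j_n ref, v_n)
        else if PySem.Str.endswith ref "v_n" then
          (non_n, full_n, cdr3j_n, PySem.Set.add v_n ref)
        else
          (PySem.Set.add non_n ref, full_n, cdr3j_n, v_n))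
    (PySem.Set.empty, PySem.Set.empty, PySem.Set.empty, PySem.Set.empty)

-- ===== PORT B =====
-- recursion over the suffix list: each step peels the elements matching the first suffix
-- off the remainder (set comprehension + set difference), the final remainder comes last
def pvPeel (remaining : PySem.Set String) (suffixes : List String) : List (PySem.Set String) :=
  match suffixes with
  | [] => [remaining]
  | suffix :: rest =>
    let matched := PySem.Set.ofList (remaining.filter (fun r => PySem.Str.endswith r suffix))
    matched :: pvPeel (PySem.Set.diff remaining matched) rest

def split_ref_names_set_into_subsets_alt (ref_names_set : List String) : List String × List String × List String × List String :=
  match pvPeel (PySem.Set.ofList ref_names_set) ["full_n", "cdr3j_n", "v_n"] with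
  | [full_b, cdr3j_b, v_b, non_b] => (non_b, full_b, cdr3j_b, v_b)
  | _ => ([], [], [], [])  -- unreachable: peeling k suffixes yields k+1 sets (Python's unpack would raise)

-- ===== PRECONDITION & SPEC =====
def Spec_split_ref_names_set_into_subsets (ref_names_set : List String) (out : List String × List String × List String × List String) : Prop := out = split_ref_names_set_into_subsets_alt ref_names_set
instance (ref_names_set : List String) (out : List String × List String × List String × List String) : Decidable (Spec_split_ref_names_set_into_subsets ref_names_set out) := by unfold Spec_split_ref_names_set_into_subsets; infer_instance

-- ===== CLAIM (what is proved, stated in full; the proofs are below) =====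
def Claim_equal_split_ref_names_set_into_subsets : Prop := ∀ (ref_names_set : List String), Dom_split_ref_names_set_into_subsets ref_names_set → Spec_split_ref_names_set_into_subsets ref_names_set (split_ref_names_set_into_subsets ref_names_set)

-- ===== LEMMAS AND PROOFS =====

-- no two of the three suffixes can end the same string (none is a suffix of another)
theorem pv_not_full_cdr3j (r : String) (h1 : PySem.Str.endswith r "full_n" = true)
    (h2 : PySem.Str.endswith r "cdr3j_n" = true) : False := by
  rw [PySem.Str.endswith_eq, PySem.Chars.endswith_iff] at h1 h2
  rcases List.suffix_or_suffix_of_suffix h1 h2 with h | h <;> revert h <;> decide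

theorem pv_not_full_v (r : String) (h1 : PySem.Str.endswith r "full_n" = true)
    (h2 : PySem.Str.endswith r "v_n" = true) : False := by
  rw [PySem.Str.endswith_eq, PySem.Chars.endswith_iff] at h1 h2
  rcases List.suffix_or_suffix_of_suffix h1 h2 with h | h <;> revert h <;> decide

theorem pv_not_cdr3j_v (r : String) (h1 : PySem.Str.endswith r "cdr3j_n" = true)
    (h2 : PySem.Str.endswith r "v_n" = true) : False := by
  rw [PySem.Str.endswith_eq, PySem.Chars.endswith_iff] at h1 h2
  rcases List.suffix_or_suffix_of_suffix h1 h2 with h | h <;> revert h <;> decide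

-- conditional insertion folds: foldl (add-if-p) over xs starting from s
def pvAddIf (p : String → Bool) (s : PySem.Set String) (x : String) : PySem.Set String :=
  if p x then PySem.Set.add s x else s

-- A's fold splits into four independent conditional-insertion folds
theorem pv_foldA_split (xs : List String) (n f c v : PySem.Set String) :
    xs.foldl
      (fun acc ref =>
        match acc with
        | (non_n, full_n, cdr3j_n, v_n) =>
          if PySem.Str.endswith ref "full_n" then
            (non_n, PySem.Set.add full_n ref, cdr3j_n, v_n)
          else if PySem.Str.endswith ref "cdr3j_n" then
            (non_n, full_n, PySem.Set.add cdr3j_n ref, v_n)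
          else if PySem.Str.endswith ref "v_n" then
            (non_n, full_n, cdr3j_n, PySem.Set.add v_n ref)
          else
            (PySem.Set.add non_n ref, full_n, cdr3j_n, v_n))
      (n, f, c, v)
    = (xs.foldl (pvAddIf (fun r => !PySem.Str.endswith r "full_n" &&
                                   !PySem.Str.endswith r "cdr3j_n" &&
                                   !PySem.Str.endswith r "v_n")) n,
       xs.foldl (pvAddIf (fun r => PySem.Str.endswith r "full_n")) f,
       xs.foldl (pvAddIf (fun r => PySem.Str.endswith r "cdr3j_n")) c,
       xs.foldl (pvAddIf (fun r => PySem.Str.endswith r "v_n")) v) := by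
  induction xs generalizing n f c v with
  | nil => rfl
  | cons x t ih =>
    simp only [List.foldl_cons]
    by_cases h1 : PySem.Str.endswith x "full_n"
    · have h2 : PySem.Str.endswith x "cdr3j_n" = false := by
        by_contra h; exact pv_not_full_cdr3j x h1 (by simpa using h)
      have h3 : PySem.Str.endswith x "v_n" = false := by
        by_contra h; exact pv_not_full_v x h1 (by simpa using h)
      simp only [pvAddIf, h1, h2, h3, reduceIte, Bool.not_true, Bool.not_false,
        Bool.false_and, Bool.true_and, Bool.and_false, Bool.and_true, Bool.and_self]
      exact ih _ _ _ _
    · rw [Bool.not_eq_true] at h1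
      by_cases h2 : PySem.Str.endswith x "cdr3j_n"
      · have h3 : PySem.Str.endswith x "v_n" = false := by
          by_contra h; exact pv_not_cdr3j_v x h2 (by simpa using h)
        simp only [pvAddIf, h1, h2, h3, reduceIte, Bool.not_true, Bool.not_false]
        exact ih _ _ _ _
      · rw [Bool.not_eq_true] at h2
        by_cases h3 : PySem.Str.endswith x "v_n"
        · simp only [pvAddIf, h1, h2, h3, reduceIte, Bool.not_true, Bool.not_false]
          exact ih _ _ _ _
        · rw [Bool.not_eq_true] at h3
          simp only [pvAddIf, h1, h2, h3, reduceIte, Bool.not_true, Bool.not_false]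
          exact ih _ _ _ _

-- a conditional-insertion fold is the plain Set fold of the filtered list
theorem pv_foldl_addIf (p : String → Bool) (xs : List String) (s : PySem.Set String) :
    xs.foldl (pvAddIf p) s = (xs.filter p).foldl PySem.Set.add s := by
  induction xs generalizing s with
  | nil => rfl
  | cons x t ih =>
    by_cases h : p x <;> simp [h, pvAddIf, ih]

theorem pv_foldl_addIf_ofList (p : String → Bool) (xs : List String) :
    xs.foldl (pvAddIf p) PySem.Set.empty = PySem.Set.ofList (xs.filter p) := by
  rw [pv_foldl_addIf]; rfl

-- Set.add commutes with filtering when the added element satisfies the filter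
theorem pv_filter_add (p : String → Bool) (s : PySem.Set String) (x : String) (hx : p x = true) :
    (PySem.Set.add s x).filter p = PySem.Set.add (s.filter p) x := by
  by_cases h : x ∈ s
  · have h2 : x ∈ List.filter p s := List.mem_filter.mpr ⟨h, hx⟩
    simp [PySem.Set.add, h, h2]
  · have h2 : x ∉ List.filter p s := fun hc => h (List.mem_filter.mp hc).1
    simp [PySem.Set.add, h, h2, List.filter_append, hx]

theorem pv_filter_add_neg (p : String → Bool) (s : PySem.Set String) (x : String) (hx : p x = false) :
    (PySem.Set.add s x).filter p = s.filter p := by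
  by_cases h : x ∈ s <;> simp [PySem.Set.add, h, List.filter_append, hx]

-- ofList commutes with filter
theorem pv_ofList_filter (p : String → Bool) (xs : List String) :
    PySem.Set.ofList (xs.filter p) = (PySem.Set.ofList xs).filter p := by
  suffices h : ∀ s : PySem.Set String,
      (xs.filter p).foldl PySem.Set.add (s.filter p) = (xs.foldl PySem.Set.add s).filter p by
    simpa using h PySem.Set.empty
  induction xs with
  | nil => intro s; rfl
  | cons x t ih =>
    intro s
    by_cases h : p x
    · simp [h, ← pv_filter_add p s x h, ih]
    · simp [h, ← pv_filter_add_neg p s x (by simpa using h), ih]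

-- peeling one suffix off a duplicate-free remainder: the matched bucket is a plain filter,
-- and the set difference is the complementary filter
theorem pv_matched_eq (s : PySem.Set String) (hs : s.Nodup) (p : String → Bool) :
    PySem.Set.ofList (s.filter p) = s.filter p :=
  PySem.Set.ofList_eq_self_of_nodup _ (hs.filter p)

theorem pv_diff_matched (s : PySem.Set String) (hs : s.Nodup) (p : String → Bool) :
    PySem.Set.diff s (PySem.Set.ofList (s.filter p)) = s.filter (fun x => !p x) := by
  rw [pv_matched_eq s hs p]
  show s.filter _ = _
  apply List.filter_congr
  intro x hx
  by_cases h : p x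
  · have : x ∈ List.filter p s := List.mem_filter.mpr ⟨hx, h⟩
    simp [h, this]
  · have hpx : p x = false := by simpa using h
    have : x ∉ List.filter p s := fun hc => by
      have := (List.mem_filter.mp hc).2; rw [hpx] at this; exact Bool.false_ne_true this
    simp [hpx, this]

-- peeling one suffix: the matched bucket is a filter, the remainder the complementary filter
theorem pv_peel_cons (s : PySem.Set String) (hs : s.Nodup) (u : String) (rest : List String) :
    pvPeel s (u :: rest) =
      s.filter (fun r => PySem.Str.endswith r u) ::
        pvPeel (s.filter (fun x => !PySem.Str.endswith x u)) rest := by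
  simp only [pvPeel]
  rw [pv_diff_matched s hs, pv_matched_eq s hs]

-- ===== VERDICT (by name: the statement is the Claim_ definition above) =====
theorem split_ref_names_set_into_subsets_spec : Claim_equal_split_ref_names_set_into_subsets := by
  intro xs _
  show split_ref_names_set_into_subsets xs = split_ref_names_set_into_subsets_alt xs
  rw [split_ref_names_set_into_subsets, split_ref_names_set_into_subsets_alt]
  rw [pv_foldA_split]
  simp only [pv_foldl_addIf_ofList, pv_ofList_filter]
  have hs : (PySem.Set.ofList xs).Nodup := PySem.Set.nodup_ofList xs
  rw [pv_peel_cons _ hs, pv_peel_cons _ (hs.filter _), pv_peel_cons _ ((hs.filter _).filter _)]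
  simp only [pvPeel, List.filter_filter]
  refine Prod.ext ?_ (Prod.ext ?_ (Prod.ext ?_ ?_)) <;> simp only
  · apply List.filter_congr; intro x _
    cases PySem.Str.endswith x "full_n" <;> cases PySem.Str.endswith x "cdr3j_n" <;>
      cases PySem.Str.endswith x "v_n" <;> rfl
  · apply List.filter_congr; intro x _
    by_cases h : PySem.Str.endswith x "cdr3j_n"
    · have h1 : PySem.Str.endswith x "full_n" = false := by
        by_contra hf; exact pv_not_full_cdr3j x (by simpa using hf) h
      simp_all [PySem.Str.endswith_eq]
    · have h' : PySem.Str.endswith x "cdr3j_n" = false := by simpa using h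
      simp_all [PySem.Str.endswith_eq]
  · apply List.filter_congr; intro x _
    by_cases h : PySem.Str.endswith x "v_n"
    · have h1 : PySem.Str.endswith x "full_n" = false := by
        by_contra hf; exact pv_not_full_v x (by simpa using hf) h
      have h2 : PySem.Str.endswith x "cdr3j_n" = false := by
        by_contra hf; exact pv_not_cdr3j_v x (by simpa using hf) h
      simp_all [PySem.Str.endswith_eq]
    · have h' : PySem.Str.endswith x "v_n" = false := by simpa using h
      simp_all [PySem.Str.endswith_eq]
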